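-- pv_equiv track=rewrite | github.com/need4spd/eulerproject | need4spd/euler_35.py | getCircularList
-- ===== SOURCE A (Python) =====
-- def getCircularList(n):
--     n_list = [c for c in (str(n))]
--
--     result_list = list()
--     loop_cnt = len(str(n)) - 1
--
--     result_list.append(n)
--
--     while (loop_cnt > 0):
--         t = n_list.pop(-1)
--         n_list.insert(0, t)
--
--         result_list.append(int("".join(str(c) for c in n_list)))
--         loop_cnt = loop_cnt - 1
--
--     return result_list
-- ===== SOURCE B (Python) =====
-- def getCircularList(n):
--     s = str(n)
--     return [n] + [int(s[-k:] + s[:-k]) for k in range(1, len(s))]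
-- ===== Notes on version B (the rewrite author's own statement) =====
-- stated objective: simpler
-- what changed: A maintains a mutable digit list and repeatedly pops the last char and reinserts it at the front inside a while loop; B computes each rotation independently and statelessly by slicing the original string (s[-k:] + s[:-k]) in a comprehension.
import Mathlib
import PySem

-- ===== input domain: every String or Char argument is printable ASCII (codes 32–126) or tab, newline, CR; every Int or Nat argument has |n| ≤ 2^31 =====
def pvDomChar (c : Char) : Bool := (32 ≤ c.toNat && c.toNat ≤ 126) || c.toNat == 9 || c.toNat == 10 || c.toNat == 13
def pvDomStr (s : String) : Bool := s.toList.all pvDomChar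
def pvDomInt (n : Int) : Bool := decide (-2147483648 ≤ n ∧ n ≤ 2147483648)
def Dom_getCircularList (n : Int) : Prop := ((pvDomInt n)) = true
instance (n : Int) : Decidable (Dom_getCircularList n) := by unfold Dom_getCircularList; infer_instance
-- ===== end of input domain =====

-- B replaces A's mutate-pop-insert loop over a digit list by stateless slicing of str(n); objective: simpler.

-- ===== PORT A =====
-- the while loop: fuel = loop_cnt (= len(str n) - 1 ≥ 0); state = (n_list, result_list)
def getCircularListLoop : Nat → List Char → List Int → List Int
  | 0, _, res => res
  | k + 1, cs, res =>
    match PySem.List.pop? cs (-1) with          -- t = n_list.pop(-1)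
    | none => res                               -- unreachable: str(n) is never empty (Python: IndexError)
    | some (t, rest) =>
      let cs' := PySem.List.insert rest 0 t     -- n_list.insert(0, t)
      -- int("".join(str(c) for c in n_list)): ofChars? is exact; none = ValueError (n < 0, outside Pre_)
      getCircularListLoop k cs' (res ++ [(PySem.Int.ofChars? cs').getD 0])

def getCircularList (n : Int) : List Int :=
  let nList := (PySem.Int.toStr n).toList       -- [c for c in str(n)]
  let loopCnt := nList.length - 1               -- len(str(n)) - 1 (≥ 0 in Python, since len(str(n)) ≥ 1)
  getCircularListLoop loopCnt nList [n]

-- ===== PORT B =====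
def getCircularList_alt (n : Int) : List Int :=
  let s := (PySem.Int.toStr n).toList
  [n] ++ (PySem.List.pyRange 1 s.length 1).map (fun k =>
    -- int(s[-k:] + s[:-k]); ofChars? is exact, none = ValueError (n < 0, outside Pre_)
    (PySem.Int.ofChars? (PySem.List.slice s (some (-k)) none ++
                         PySem.List.slice s none (some (-k)))).getD 0)

-- ===== PRECONDITION & SPEC =====
-- Pre_ excludes n < 0: there every rotation moves '-' inside the string and A's int(...) raises ValueError.
def Pre_getCircularList (n : Int) : Prop := 0 ≤ n
instance (n : Int) : Decidable (Pre_getCircularList n) := by unfold Pre_getCircularList; infer_instance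
def pvWitness_getCircularList : Int := (197)

def Spec_getCircularList (n : Int) (out : List Int) : Prop := out = getCircularList_alt n
instance (n : Int) (out : List Int) : Decidable (Spec_getCircularList n out) := by unfold Spec_getCircularList; infer_instance

-- ===== CLAIM (what is proved, stated in full; the proofs are below) =====
def Claim_equal_getCircularList : Prop := ∀ (n : Int), Dom_getCircularList n → Pre_getCircularList n → Spec_getCircularList n (getCircularList n)

-- ===== LEMMAS AND PROOFS =====

-- right-rotation of a list by j places (j ≤ length), as B's slices produce it
def rotR (j : Nat) (cs : List Char) : List Char :=
  cs.drop (cs.length - j) ++ cs.take (cs.length - j)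

lemma rotR_zero (cs : List Char) : rotR 0 cs = cs := by
  simp [rotR]

-- one iteration of A's loop body (pop last, insert at front) advances the rotation by one
lemma step_rotR (cs : List Char) (j : Nat) (hj : j + 1 ≤ cs.length) :
    ∃ t rest, PySem.List.pop? (rotR j cs) (-1) = some (t, rest) ∧
      PySem.List.insert rest 0 t = rotR (j + 1) cs := by
  have hlt : cs.length - j - 1 < cs.length := by omega
  have hdecomp : rotR j cs =
      (cs.drop (cs.length - j) ++ cs.take (cs.length - j - 1)) ++ [cs[cs.length - j - 1]] := by
    have : cs.take (cs.length - j) = cs.take (cs.length - j - 1) ++ [cs[cs.length - j - 1]] := by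
      have := List.take_add_one (l := cs) (i := cs.length - j - 1)
      rw [show cs.length - j - 1 + 1 = cs.length - j by omega] at this
      simp [this, List.getElem?_eq_getElem hlt]
    simp [rotR, this]
  refine ⟨cs[cs.length - j - 1], cs.drop (cs.length - j) ++ cs.take (cs.length - j - 1), ?_, ?_⟩
  · rw [hdecomp]; exact PySem.List.pop?_last _ _
  · rw [PySem.List.insert_zero, rotR, show cs.length - (j + 1) = cs.length - j - 1 by omega]
    have : cs.drop (cs.length - j - 1) = cs[cs.length - j - 1] :: cs.drop (cs.length - j) := by
      rw [List.drop_eq_getElem_cons hlt, show cs.length - j - 1 + 1 = cs.length - j by omega]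
    rw [this]
    simp

-- A's loop, started at rotation j with m steps left (all in range), appends the next m rotations
lemma getCircularListLoop_spec (cs : List Char) :
    ∀ (m j : Nat), j + m ≤ cs.length → ∀ (res : List Int),
      getCircularListLoop m (rotR j cs) res =
        res ++ (List.range m).map (fun i => (PySem.Int.ofChars? (rotR (j + i + 1) cs)).getD 0) := by
  intro m
  induction m with
  | zero => intro j _ res; simp [getCircularListLoop]
  | succ k ih =>
    intro j hj res
    obtain ⟨t, rest, hpop, hins⟩ := step_rotR cs j (by omega)
    rw [getCircularListLoop, hpop]
    simp only []
    rw [hins, ih (j + 1) (by omega)]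
    rw [List.range_succ_eq_map, List.map_cons, List.map_map]
    simp only [List.append_assoc, List.singleton_append]
    congr 1
    congr 1
    apply List.map_congr_left
    intro i _
    simp only [Function.comp_apply]
    rw [show j + 1 + i + 1 = j + Nat.succ i + 1 by omega]

lemma toDigitsCore_ne_nil (b : Nat) :
    ∀ (f n : Nat) (acc : List Char), acc ≠ [] → Nat.toDigitsCore b f n acc ≠ [] := by
  intro f
  induction f with
  | zero => intro n acc h; simpa [Nat.toDigitsCore] using h
  | succ k ih =>
    intro n acc h
    rw [Nat.toDigitsCore]
    split
    · simp
    · exact ih _ _ (by simp)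

lemma toChars_ne_nil (n : Int) : PySem.Int.toChars n ≠ [] := by
  unfold PySem.Int.toChars
  split
  · simp
  · unfold Nat.toDigits
    rw [Nat.toDigitsCore]
    split
    · simp
    · exact toDigitsCore_ne_nil 10 _ _ _ (by simp)

-- B's k-th slice pair (1 ≤ k ≤ len) is exactly the k-th right-rotation
lemma slice_pair_eq_rotR (cs : List Char) (k : Nat) (hk : 0 < k) :
    PySem.List.slice cs (some (-(k : Int))) none ++ PySem.List.slice cs none (some (-(k : Int))) =
      rotR k cs := by
  rw [PySem.List.slice_from_neg_natCast cs k hk, PySem.List.slice_to_neg_natCast cs k hk, rotR]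

-- ===== VERDICT (by name: the statement is the Claim_ definition above) =====
theorem getCircularList_spec : Claim_equal_getCircularList := by
  intro n _ _
  unfold Spec_getCircularList getCircularList getCircularList_alt
  simp only [PySem.Int.toList_toStr]
  set cs := PySem.Int.toChars n with hcs
  have hne : cs ≠ [] := toChars_ne_nil n
  have hlen : 1 ≤ cs.length := List.length_pos_of_ne_nil hne
  have hA : getCircularListLoop (cs.length - 1) cs [n] =
      [n] ++ (List.range (cs.length - 1)).map
        (fun i => (PySem.Int.ofChars? (rotR (i + 1) cs)).getD 0) := by
    have := getCircularListLoop_spec cs (cs.length - 1) 0 (by omega) [n]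
    rw [rotR_zero] at this
    simpa using this
  rw [hA, PySem.List.pyRange_one]
  congr 1
  have hcast : ((cs.length : Int) - 1).toNat = cs.length - 1 := by omega
  rw [hcast, List.map_map]
  apply List.map_congr_left
  intro i hi
  simp only [Function.comp_apply]
  rw [List.mem_range] at hi
  have h1i : (1 : Int) + i = ((i + 1 : Nat) : Int) := by push_cast; ring
  rw [h1i, slice_pair_eq_rotR cs (i + 1) (by omega)]
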